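-- pv_equiv track=rewrite | github.com/Perdonus/tgwebmobile | .github/scripts/extract_gradle_errors.py | collect_summary
-- ===== SOURCE A (Python) =====
-- PATTERNS = (
--     'e: file:///',
--     'w: file:///',
--     'FAILURE:',
--     'BUILD FAILED',
--     'Execution failed for task',
--     'Compilation error',
--     'Caused by:',
--     'What went wrong:',
--     '* What went wrong:',
--     'Exception:',
--     'error:',
--     'Unresolved reference',
--     'Cannot access',
-- )
--
-- def collect_summary(lines: list[str]) -> list[str]:
--     hit_indexes: list[int] = []
--     for idx, line in enumerate(lines):
--         if any(pattern in line for pattern in PATTERNS):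
--             hit_indexes.append(idx)
--
--     if not hit_indexes:
--         return lines[-140:]
--
--     collected: list[str] = []
--     seen: set[tuple[int, str]] = set()
--     for idx in hit_indexes:
--         start = max(0, idx - 4)
--         end = min(len(lines), idx + 8)
--         for line_no in range(start, end):
--             line = lines[line_no]
--             key = (line_no, line)
--             if key in seen:
--                 continue
--             seen.add(key)
--             collected.append(line)
--     return collected[-220:]
-- ===== SOURCE B (Python) =====
-- PATTERNS = (
--     'e: file:///',
--     'w: file:///',
--     'FAILURE:',
--     'BUILD FAILED',
--     'Execution failed for task',
--     'Compilation error',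
--     'Caused by:',
--     'What went wrong:',
--     '* What went wrong:',
--     'Exception:',
--     'error:',
--     'Unresolved reference',
--     'Cannot access',
-- )
--
-- def collect_summary(lines: list[str]) -> list[str]:
--     hits = [i for i, line in enumerate(lines)
--             if any(p in line for p in PATTERNS)]
--     if not hits:
--         return lines[-140:]
--     n = len(lines)
--     # merge the context windows into disjoint ranges (hits are increasing)
--     ranges: list[tuple[int, int]] = []
--     for idx in hits:
--         s, e = max(0, idx - 4), min(n, idx + 8)
--         if ranges and s <= ranges[-1][1]:
--             a, b = ranges[-1]
--             ranges[-1] = (a, max(b, e))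
--         else:
--             ranges.append((s, e))
--     collected: list[str] = []
--     for s, e in ranges:
--         collected.extend(lines[s:e])
--     return collected[-220:]
-- ===== Notes on version B (the rewrite author's own statement) =====
-- stated objective: alternative
-- what changed: Replaces the per-hit window emission guarded by a (line_no, line) dedup set with a single left-to-right merge of the overlapping-or-touching context windows into disjoint intervals, each emitted once via list slices.
import Mathlib
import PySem

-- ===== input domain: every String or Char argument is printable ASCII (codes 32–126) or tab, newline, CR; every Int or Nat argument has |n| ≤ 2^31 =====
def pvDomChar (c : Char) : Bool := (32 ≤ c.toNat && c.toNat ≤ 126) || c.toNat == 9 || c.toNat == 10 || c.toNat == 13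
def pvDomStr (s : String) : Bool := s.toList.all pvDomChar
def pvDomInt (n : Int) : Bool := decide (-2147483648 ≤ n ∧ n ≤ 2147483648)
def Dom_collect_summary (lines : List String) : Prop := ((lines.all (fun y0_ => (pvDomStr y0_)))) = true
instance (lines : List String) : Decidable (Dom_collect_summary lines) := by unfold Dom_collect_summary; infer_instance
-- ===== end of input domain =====

-- B replaces A's per-hit window emission guarded by a (line_no, line) dedup set with a
-- single merge of the context windows into disjoint intervals emitted once via slices.

def pvPatterns : List String :=
  ["e: file:///", "w: file:///", "FAILURE:", "BUILD FAILED", "Execution failed for task",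
   "Compilation error", "Caused by:", "What went wrong:", "* What went wrong:",
   "Exception:", "error:", "Unresolved reference", "Cannot access"]

def pvHit (line : String) : Bool := pvPatterns.any (fun p => PySem.Str.isIn p line)

-- ===== PORT A =====
def collect_summary (lines : List String) : List String :=
  let hit_indexes : List Int :=
    (PySem.List.enumerate lines 0).foldl
      (fun acc p => if pvHit p.2 then acc ++ [p.1] else acc) []
  if hit_indexes = [] then
    PySem.List.slice lines (some (-140)) none
  else
    let res :=
      hit_indexes.foldl
        (fun (st : List String × PySem.Set (Int × String)) idx =>
          let start := max 0 (idx - 4)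
          let stop := min (lines.length : Int) (idx + 8)
          (PySem.List.pyRange start stop 1).foldl
            (fun (st : List String × PySem.Set (Int × String)) line_no =>
              let line := PySem.List.pyGetD lines line_no ""
              if PySem.Set.contains st.2 (line_no, line) then st
              else (st.1 ++ [line], PySem.Set.add st.2 (line_no, line)))
            st)
        ([], PySem.Set.empty)
    PySem.List.slice res.1 (some (-220)) none

-- ===== PORT B =====
def collect_summary_alt (lines : List String) : List String :=
  let hits : List Int :=
    ((PySem.List.enumerate lines 0).filter (fun p => pvHit p.2)).map (fun p => p.1)
  if hits = [] then
    PySem.List.slice lines (some (-140)) none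
  else
    let n : Int := lines.length
    let ranges : List (Int × Int) :=
      (hits.foldl
        (fun (acc : List (Int × Int)) idx =>
          let s := max 0 (idx - 4)
          let e := min n (idx + 8)
          match acc with
          | [] => [(s, e)]
          | (a, b) :: rest =>
              if s ≤ b then (a, max b e) :: rest else (s, e) :: (a, b) :: rest)
        []).reverse
    let collected : List String :=
      ranges.foldl (fun acc r => acc ++ PySem.List.slice lines (some r.1) (some r.2)) []
    PySem.List.slice collected (some (-220)) none

-- ===== PRECONDITION & SPEC =====
def Spec_collect_summary (lines : List String) (out : List String) : Prop := out = collect_summary_alt lines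
instance (lines : List String) (out : List String) : Decidable (Spec_collect_summary lines out) := by unfold Spec_collect_summary; infer_instance

-- ===== CLAIM (what is proved, stated in full; the proofs are below) =====
def Claim_equal_collect_summary : Prop := ∀ (lines : List String), Dom_collect_summary lines → Spec_collect_summary lines (collect_summary lines)

-- ===== LEMMAS AND PROOFS =====

-- the lines of index window [a, b), read through pyGetD
def pvEmit (lines : List String) (a b : Int) : List String :=
  (PySem.List.pyRange a b 1).map (fun i => PySem.List.pyGetD lines i "")

-- interval-merge continuation: current open interval (a, b), remaining hits
def pvMerge (n a b : Int) : List Int → List (Int × Int)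
  | [] => [(a, b)]
  | idx :: t =>
      let s := max 0 (idx - 4)
      let e := min n (idx + 8)
      if s ≤ b then pvMerge n a (max b e) t else (a, b) :: pvMerge n s e t

theorem pvEmit_append (lines : List String) (a b c : Int) (h1 : a ≤ b) (h2 : b ≤ c) :
    pvEmit lines a b ++ pvEmit lines b c = pvEmit lines a c := by
  simp [pvEmit, ← List.map_append, ← PySem.List.pyRange_one_append a b c h1 h2]

theorem pvContains_pairs (lines : List String) (u v i : Int) :
    List.contains ((PySem.List.pyRange u v 1).map (fun j => (j, PySem.List.pyGetD lines j "")))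
      (i, PySem.List.pyGetD lines i "") = decide (u ≤ i ∧ i < v) := by
  by_cases h : u ≤ i ∧ i < v
  · simp only [decide_eq_true h, List.contains_iff_mem, List.mem_map]
    exact ⟨i, PySem.List.mem_pyRange_one.2 h, rfl⟩
  · rw [decide_eq_false h, ← Bool.not_eq_true, List.contains_iff_mem]
    simp only [List.mem_map]
    rintro ⟨j, hj, hji⟩
    have : j = i := congrArg Prod.fst hji
    exact h (this ▸ PySem.List.mem_pyRange_one.1 hj)

theorem pvB_fold_eq_merge (n : Int) (hits : List Int) : ∀ (a b : Int) (rest : List (Int × Int)),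
    (hits.foldl
      (fun (acc : List (Int × Int)) idx =>
        let s := max 0 (idx - 4)
        let e := min n (idx + 8)
        match acc with
        | [] => [(s, e)]
        | (a, b) :: rest =>
            if s ≤ b then (a, max b e) :: rest else (s, e) :: (a, b) :: rest)
      ((a, b) :: rest)).reverse
    = rest.reverse ++ pvMerge n a b hits := by
  induction hits with
  | nil => intro a b rest; simp [pvMerge]
  | cons idx t ih =>
    intro a b rest
    simp only [List.foldl_cons, pvMerge]
    by_cases h : max 0 (idx - 4) ≤ b
    · simp only [if_pos h, ih]
    · simp only [if_neg h, ih]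
      simp

theorem pvA_inner (lines : List String) (b : Int) : ∀ (k : Nat) (s : Int) (col : List String) (seen : PySem.Set (Int × String)),
    (∀ i : Int, s ≤ i → i < s + k → (PySem.Set.contains seen (i, PySem.List.pyGetD lines i "") = decide (i < b))) →
    ((PySem.List.pyRange s (s + k) 1).foldl
      (fun (st : List String × PySem.Set (Int × String)) line_no =>
        let line := PySem.List.pyGetD lines line_no ""
        if PySem.Set.contains st.2 (line_no, line) then st
        else (st.1 ++ [line], PySem.Set.add st.2 (line_no, line)))
      (col, seen))
    = (col ++ pvEmit lines (max s b) (s + k),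
       seen ++ (PySem.List.pyRange (max s b) (s + k) 1).map (fun i => (i, PySem.List.pyGetD lines i ""))) := by
  intro k
  induction k with
  | zero =>
    intro s col seen _
    simp [pvEmit]
  | succ k ih =>
    intro s col seen hseen
    have hcons : PySem.List.pyRange s (s + (k+1:Nat)) 1 = s :: PySem.List.pyRange (s+1) (s + (k+1:Nat)) 1 :=
      PySem.List.pyRange_one_cons (by push_cast; omega)
    have heq : s + ((k:Nat)+1:Nat) = (s+1) + (k:Nat) := by push_cast; omega
    rw [hcons, List.foldl_cons]
    have hc : PySem.Set.contains seen (s, PySem.List.pyGetD lines s "") = decide (s < b) :=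
      hseen s le_rfl (by push_cast; omega)
    by_cases hsb : s < b
    · -- already seen: skip
      simp only [hc, decide_eq_true hsb, reduceIte]
      rw [heq, ih (s+1) col seen (fun i h1 h2 => hseen i (by omega) (by omega))]
      have hm : max (s+1) b = max s b := by omega
      rw [hm, ← heq]
    · -- fresh: append
      have hcf : PySem.Set.contains seen (s, PySem.List.pyGetD lines s "") = false := by
        rw [hc]; simp [hsb]
      simp only [hcf, Bool.false_eq_true, reduceIte]
      have hadd : PySem.Set.add seen (s, PySem.List.pyGetD lines s "") = seen ++ [(s, PySem.List.pyGetD lines s "")] := by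
        simp only [PySem.Set.add, hcf, Bool.false_eq_true, reduceIte]
      rw [hadd, heq, ih (s+1) (col ++ [PySem.List.pyGetD lines s ""]) (seen ++ [(s, PySem.List.pyGetD lines s "")]) ?_]
      · have hm1 : max s b = s := by omega
        have hm2 : max (s+1) b = s + 1 := by omega
        have hcons2 : PySem.List.pyRange s ((s+1) + (k:Nat)) 1 = s :: PySem.List.pyRange (s+1) ((s+1) + (k:Nat)) 1 :=
          PySem.List.pyRange_one_cons (by omega)
        rw [hm1, hm2, ← heq, heq, hcons2]
        simp [pvEmit, hcons2]
      · intro i h1 h2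
        have hne : ¬ (i = s) := by omega
        have := hseen i (by omega) (by omega)
        simp only [PySem.Set.contains, List.contains_append] at this ⊢
        rw [this]
        simp [hne]

theorem pvA_outer (lines : List String) (hits : List Int) : ∀ (a b : Int) (col : List String) (seen : PySem.Set (Int × String)),
    a ≤ b →
    (∀ idx ∈ hits, a ≤ max 0 (idx - 4)) →
    (∀ idx ∈ hits, 0 ≤ idx ∧ idx < (lines.length : Int)) →
    hits.Pairwise (· ≤ ·) →
    (∀ i : Int, a ≤ i → (PySem.Set.contains seen (i, PySem.List.pyGetD lines i "") = decide (i < b))) →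
    (hits.foldl
      (fun (st : List String × PySem.Set (Int × String)) idx =>
        let start := max 0 (idx - 4)
        let stop := min (lines.length : Int) (idx + 8)
        (PySem.List.pyRange start stop 1).foldl
          (fun (st : List String × PySem.Set (Int × String)) line_no =>
            let line := PySem.List.pyGetD lines line_no ""
            if PySem.Set.contains st.2 (line_no, line) then st
            else (st.1 ++ [line], PySem.Set.add st.2 (line_no, line)))
          st)
      (col ++ pvEmit lines a b, seen)).1
    = col ++ (pvMerge (lines.length : Int) a b hits).flatMap (fun r => pvEmit lines r.1 r.2) := by
  induction hits with
  | nil => intro a b col seen _ _ _ _ _; simp [pvMerge]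
  | cons idx t ih =>
    intro a b col seen hab hA hIdx hSort hSeen
    obtain ⟨hi0, hin⟩ := hIdx idx (by simp)
    have hAi : a ≤ max 0 (idx - 4) := hA idx (by simp)
    set s := max 0 (idx - 4) with hs
    set e := min (lines.length : Int) (idx + 8) with he
    have hse : s ≤ e := by omega
    have hke : s + ((e - s).toNat : Int) = e := by omega
    rw [List.foldl_cons]
    have hinner := pvA_inner lines b ((e - s).toNat) s (col ++ pvEmit lines a b) seen
      (fun i h1 _ => hSeen i (by omega))
    rw [hke] at hinner
    simp only []
    rw [← hs, ← he, hinner]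
    have htail : t.Pairwise (· ≤ ·) := (List.pairwise_cons.1 hSort).2
    have hmono : ∀ x ∈ t, idx ≤ x := (List.pairwise_cons.1 hSort).1
    have hIdx' : ∀ x ∈ t, 0 ≤ x ∧ x < (lines.length : Int) := fun x hx => hIdx x (by simp [hx])
    by_cases hsb : s ≤ b
    · -- window touches/overlaps the frontier: extend
      have hmax : max s b = b := by omega
      have hstate : col ++ pvEmit lines a b ++ pvEmit lines (max s b) e
          = col ++ pvEmit lines a (max b e) := by
        rw [hmax, List.append_assoc]
        by_cases hbe : b ≤ e
        · rw [pvEmit_append lines a b e hab hbe]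
          have : max b e = e := by omega
          rw [this]
        · have h1 : pvEmit lines b e = [] := by
            simp [pvEmit, PySem.List.pyRange_one_eq_nil (by omega : e ≤ b)]
          have h2 : max b e = b := by omega
          simp [h1, h2]
      rw [hstate]
      have hnext := ih a (max b e) col
        (seen ++ (PySem.List.pyRange (max s b) e 1).map (fun i => (i, PySem.List.pyGetD lines i "")))
        (by omega) (fun x hx => hA x (by simp [hx])) hIdx' htail ?_
      · simp only [] at hnext
        rw [hnext]
        have hm : pvMerge (lines.length : Int) a b (idx :: t)
            = pvMerge (lines.length : Int) a (max b e) t := by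
          simp only [pvMerge]
          rw [← hs, ← he, if_pos hsb]
        rw [hm]
      · intro i hi
        simp only [PySem.Set.contains, List.contains_append] at *
        rw [hSeen i hi, hmax, pvContains_pairs]
        by_cases h1 : i < b <;> by_cases h2 : i < max b e <;>
          simp [h1, h2] <;> omega
    · -- gap: close the interval and open a new one
      have hmax : max s b = s := by omega
      rw [hmax]
      have hnext := ih s e (col ++ pvEmit lines a b)
        (seen ++ (PySem.List.pyRange s e 1).map (fun i => (i, PySem.List.pyGetD lines i "")))
        hse (fun x hx => by have := hmono x hx; omega) hIdx' htail ?_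
      · simp only [] at hnext
        rw [hnext]
        have hm : pvMerge (lines.length : Int) a b (idx :: t)
            = (a, b) :: pvMerge (lines.length : Int) s e t := by
          simp only [pvMerge]
          rw [← hs, ← he, if_neg hsb]
        rw [hm]
        simp [List.append_assoc]
      · intro i hi
        simp only [PySem.Set.contains, List.contains_append] at *
        rw [hSeen i (by omega), pvContains_pairs]
        by_cases h1 : i < b <;> by_cases h2 : i < e <;>
          simp [h1, h2] <;> omega

theorem pvSlice_eq_emit (lines : List String) (a b : Int) (h0 : 0 ≤ a) (hab : a ≤ b) (hb : b ≤ (lines.length : Int)) :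
    PySem.List.slice lines (some a) (some b) = pvEmit lines a b := by
  have hsplit : PySem.List.pyRange a (lines.length : Int) 1
      = PySem.List.pyRange a b 1 ++ PySem.List.pyRange b (lines.length : Int) 1 :=
    PySem.List.pyRange_one_append a b _ hab hb
  have hdropa := PySem.List.map_pyGetD_pyRange' (xs := lines) (a := a) (d := "") h0
  have hdropb := PySem.List.map_pyGetD_pyRange' (xs := lines) (a := b) (d := "") (le_trans h0 hab)
  rw [hsplit, List.map_append, hdropb] at hdropa
  have hlen : (pvEmit lines a b).length = (b - a).toNat := by
    simp [pvEmit, PySem.List.length_pyRange_one]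
  have htake : pvEmit lines a b = (lines.drop a.toNat).take (b - a).toNat := by
    rw [← hdropa, ← hlen]
    exact List.take_left.symm
  rw [PySem.List.slice_toNat lines h0 (le_trans h0 hab), htake]
  congr 1
  omega

theorem pvMerge_bounds (lines : List String) (hits : List Int) : ∀ (a b : Int),
    0 ≤ a → a ≤ b → b ≤ (lines.length : Int) →
    (∀ idx ∈ hits, 0 ≤ idx ∧ idx < (lines.length : Int)) →
    ∀ r ∈ pvMerge (lines.length : Int) a b hits, 0 ≤ r.1 ∧ r.1 ≤ r.2 ∧ r.2 ≤ (lines.length : Int) := by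
  induction hits with
  | nil => intro a b h0 hab hb _ r hr; simp [pvMerge] at hr; subst hr; exact ⟨h0, hab, hb⟩
  | cons idx t ih =>
    intro a b h0 hab hb hIdx r hr
    obtain ⟨hi0, hin⟩ := hIdx idx (by simp)
    have hIdx' : ∀ i ∈ t, 0 ≤ i ∧ i < (lines.length : Int) := fun i hi => hIdx i (by simp [hi])
    simp only [pvMerge] at hr
    by_cases h : max 0 (idx - 4) ≤ b
    · rw [if_pos h] at hr
      exact ih a (max b (min (lines.length : Int) (idx + 8))) h0 (by omega) (by omega) hIdx' r hr
    · rw [if_neg h] at hr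
      rcases List.mem_cons.1 hr with h1 | h2
      · subst h1; exact ⟨h0, hab, hb⟩
      · exact ih _ _ (by omega) (by omega) (by omega) hIdx' r h2

-- ===== VERDICT (by name: the statement is the Claim_ definition above) =====
theorem pvHits_eq (lines : List String) :
    ((PySem.List.enumerate lines 0).foldl
      (fun acc p => if pvHit p.2 then acc ++ [p.1] else acc) [])
    = ((PySem.List.enumerate lines 0).filter (fun p => pvHit p.2)).map (fun p => p.1) := by
  rw [PySem.List.foldl_append_if (p := fun q : Int × String => pvHit q.2) (f := fun q : Int × String => q.1)]
  simp

theorem pvHits_bounds (lines : List String) :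
    ∀ idx ∈ ((PySem.List.enumerate lines 0).filter (fun p => pvHit p.2)).map (fun p => p.1),
      0 ≤ idx ∧ idx < (lines.length : Int) := by
  intro idx h
  obtain ⟨p, hp, rfl⟩ := List.mem_map.1 h
  obtain ⟨k, hk, rfl⟩ := (PySem.List.mem_enumerate_iff _ _ _).1 (List.mem_of_mem_filter hp)
  refine ⟨by simp, by simp; omega⟩

theorem pvHits_sorted (lines : List String) :
    (((PySem.List.enumerate lines 0).filter (fun p => pvHit p.2)).map (fun p => p.1)).Pairwise (· ≤ ·) := by
  apply List.Pairwise.map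
  · intro a b h; exact h
  · exact (PySem.List.pairwise_lt_enumerate lines 0).filter _ |>.imp le_of_lt

-- ===== VERDICT (by name: the statement is the Claim_ definition above) =====
theorem collect_summary_spec : Claim_equal_collect_summary := by
  intro lines _
  unfold Spec_collect_summary collect_summary collect_summary_alt
  simp only []
  rw [pvHits_eq]
  set hits := ((PySem.List.enumerate lines 0).filter (fun p => pvHit p.2)).map (fun p => p.1) with hhits
  by_cases hempty : hits = []
  · simp [hempty]
  · simp only [if_neg hempty]
    obtain ⟨h, t, hht⟩ := List.exists_cons_of_ne_nil hempty
    have hh0 : 0 ≤ h ∧ h < (lines.length : Int) := pvHits_bounds lines h (by rw [← hhits, hht]; simp)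
    have htb : ∀ idx ∈ t, 0 ≤ idx ∧ idx < (lines.length : Int) := fun idx hx =>
      pvHits_bounds lines idx (by rw [← hhits, hht]; simp [hx])
    set s0 := max 0 (h - 4) with hs0
    set e0 := min (lines.length : Int) (h + 8) with he0
    have hs0e0 : 0 ≤ s0 ∧ s0 ≤ e0 ∧ e0 ≤ (lines.length : Int) := by omega
    -- A's loop: emitted lines are the flattened merged windows
    have hemit00 : pvEmit lines 0 0 = [] := by
      simp [pvEmit, PySem.List.pyRange_one_eq_nil (le_refl (0:Int))]
    have hA := pvA_outer lines hits 0 0 [] [] le_rfl (fun idx _ => le_max_left _ _)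
      (pvHits_bounds lines) (pvHits_sorted lines)
      (by intro i hi; simp [PySem.Set.contains]; omega)
    rw [hemit00] at hA
    simp only [List.append_nil, List.nil_append] at hA
    -- B's fold computes the merge
    have hBfold : (hits.foldl
        (fun (acc : List (Int × Int)) idx =>
          let s := max 0 (idx - 4)
          let e := min (lines.length : Int) (idx + 8)
          match acc with
          | [] => [(s, e)]
          | (a, b) :: rest =>
              if s ≤ b then (a, max b e) :: rest else (s, e) :: (a, b) :: rest)
        []).reverse = pvMerge (lines.length : Int) s0 e0 t := by
      rw [hht, List.foldl_cons]
      simp only []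
      rw [← hs0, ← he0]
      have := pvB_fold_eq_merge (lines.length : Int) t s0 e0 []
      simpa using this
    -- merged ranges are in bounds, so each slice is the emitted window
    have hcong : ∀ r ∈ pvMerge (lines.length : Int) s0 e0 t,
        PySem.List.slice lines (some r.1) (some r.2) = pvEmit lines r.1 r.2 := by
      intro r hr
      obtain ⟨h1, h2, h3⟩ := pvMerge_bounds lines t s0 e0 hs0e0.1 hs0e0.2.1 hs0e0.2.2 htb r hr
      exact pvSlice_eq_emit lines r.1 r.2 h1 h2 h3
    -- the pvMerge started at the empty frontier equals the one started at the first window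
    have hmerge0 : (pvMerge (lines.length : Int) 0 0 hits).flatMap (fun r => pvEmit lines r.1 r.2)
        = (pvMerge (lines.length : Int) s0 e0 t).flatMap (fun r => pvEmit lines r.1 r.2) := by
      rw [hht]
      simp only [pvMerge]
      rw [← hs0, ← he0]
      by_cases hc : s0 ≤ 0
      · have h01 : s0 = 0 := by omega
        have h02 : max 0 e0 = e0 := by omega
        rw [if_pos hc, h02, ← h01]
      · rw [if_neg hc]
        simp [hemit00]
    simp only [PySem.Set.empty]
    rw [hA, hmerge0, hBfold, PySem.List.foldl_append_eq_flatMap]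
    simp only [List.nil_append]
    congr 1
    exact List.flatMap_congr hcong |>.symm
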